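-- pv_equiv track=rewrite | github.com/MrBrantCode/unitest_baseline | mut_generate/mist_train_cf/cf_74202/solution.py | remove_even_and_sort_desc
-- ===== SOURCE A (Python) =====
-- def remove_even_and_sort_desc(n):
--     # Convert the number into string
--     str_num = str(n)
--
--     # Check if n is negative and remove minus sign
--     if str_num[0] == '-':
--         str_num = str_num[1:]
--
--     # Remove even digits
--     str_num = ''.join([digit for digit in str_num if int(digit) % 2])
--
--     # If n is zero or all digits are even (the string is empty after removing)
--     if not str_num:
--         return 0
--
--     # Sort the remaining odd digits in descending order without using sort()
--     sorted_str_num = ""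
--     for num in range(9, -1, -2):  # start from 9 to 1, step = -2
--         sorted_str_num += str_num.count(str(num)) * str(num)
--
--     # Returned the number after being processed
--     return int(sorted_str_num) if n >= 0 else -int(sorted_str_num)
-- ===== SOURCE B (Python) =====
-- def remove_even_and_sort_desc(n):
--     # Collect the odd digits of |n|, sort them descending with sorted(), rebuild the int.
--     digits = [d for d in str(abs(n)) if d in '13579']
--     if not digits:
--         return 0
--     m = int(''.join(sorted(digits, reverse=True)))
--     return m if n >= 0 else -m
-- ===== Notes on version B (the rewrite author's own statement) =====
-- stated objective: simpler
-- what changed: The hand-rolled counting sort (fixed loop over 9,7,5,3,1 with str.count and string repetition) is replaced by a comparison sort: collect the odd digits of abs(n) by membership in '13579' and sorted(..., reverse=True) them; sign handling via abs(n) instead of stripping a leading '-'.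
import Mathlib
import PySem

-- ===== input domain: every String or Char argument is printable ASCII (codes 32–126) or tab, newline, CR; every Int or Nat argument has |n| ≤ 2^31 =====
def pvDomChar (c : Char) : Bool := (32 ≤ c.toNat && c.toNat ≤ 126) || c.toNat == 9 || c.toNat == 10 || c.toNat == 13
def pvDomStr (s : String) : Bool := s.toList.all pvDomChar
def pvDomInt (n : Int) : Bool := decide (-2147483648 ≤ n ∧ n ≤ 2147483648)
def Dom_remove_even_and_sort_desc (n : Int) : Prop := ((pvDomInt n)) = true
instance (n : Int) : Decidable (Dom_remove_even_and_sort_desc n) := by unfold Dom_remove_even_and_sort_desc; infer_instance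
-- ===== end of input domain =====

-- B replaces A's fixed counting-sort reconstruction (loop over 9,7,5,3,1 with str.count) by
-- filtering the odd digits of |n| and comparison-sorting them descending; same return value.


-- ===== PORT A =====
def remove_even_and_sort_desc (n : Int) : Int :=
  -- str_num = str(n)
  let str_num := PySem.Int.toChars n
  -- if str_num[0] == '-': str_num = str_num[1:]   (str(n) is never empty, so the index never raises)
  let str_num := if PySem.List.pyGet? str_num 0 = some '-' then PySem.List.slice str_num (some 1) none else str_num
  -- ''.join([digit for digit in str_num if int(digit) % 2]) — int(digit) never raises here
  -- (every char of str(n) past the sign is a decimal digit), so .getD 0 is never the raising case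
  let str_num := str_num.filter (fun digit => PySem.Int.mod ((PySem.Int.ofChars? [digit]).getD 0) 2 != 0)
  if str_num = [] then 0
  else
    -- for num in range(9, -1, -2): sorted_str_num += str_num.count(str(num)) * str(num)
    let sorted_str_num := (PySem.List.pyRange 9 (-1) (-2)).foldl
      (fun acc num => acc ++ PySem.List.pyRepeat (PySem.Int.toChars num)
        ((PySem.Chars.count str_num (PySem.Int.toChars num) : Nat) : Int)) []
    -- int(sorted_str_num) — a nonempty string of digits, never raises
    let v := (PySem.Int.ofChars? sorted_str_num).getD 0
    if n ≥ 0 then v else -v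

-- ===== PORT B =====
def remove_even_and_sort_desc_alt (n : Int) : Int :=
  -- digits = [d for d in str(abs(n)) if d in '13579']
  let digits := (PySem.Int.toChars |n|).filter (fun d => PySem.Chars.isIn [d] ['1','3','5','7','9'])
  if digits = [] then 0
  else
    -- m = int(''.join(sorted(digits, reverse=True)))  — nonempty digit string, never raises
    let m := (PySem.Int.ofChars? (PySem.List.sorted digits (fun x => x) true)).getD 0
    if n ≥ 0 then m else -m

-- ===== PRECONDITION & SPEC =====
def Spec_remove_even_and_sort_desc (n : Int) (out : Int) : Prop := out = remove_even_and_sort_desc_alt n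
instance (n : Int) (out : Int) : Decidable (Spec_remove_even_and_sort_desc n out) := by unfold Spec_remove_even_and_sort_desc; infer_instance

-- ===== CLAIM (what is proved, stated in full; the proofs are below) =====
def Claim_equal_remove_even_and_sort_desc : Prop := ∀ (n : Int), Dom_remove_even_and_sort_desc n → Spec_remove_even_and_sort_desc n (remove_even_and_sort_desc n)

-- ===== LEMMAS AND PROOFS =====

-- the decimal digit characters
def pvD10 : List Char := ['0','1','2','3','4','5','6','7','8','9']
-- A's counting-sort output for a list of decimal-digit characters
def pvCountSorted (l : List Char) : List Char :=
  List.replicate (l.count '9') '9' ++ List.replicate (l.count '7') '7' ++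
  List.replicate (l.count '5') '5' ++ List.replicate (l.count '3') '3' ++
  List.replicate (l.count '1') '1'

lemma pv_mem_toDigitsCore : ∀ (f n : Nat) (acc : List Char),
    (∀ c ∈ acc, c ∈ pvD10) → ∀ c ∈ Nat.toDigitsCore 10 f n acc, c ∈ pvD10 := by
  intro f
  induction f with
  | zero => intro n acc hacc; simpa [Nat.toDigitsCore] using hacc
  | succ f ih =>
    intro n acc hacc
    have hd : (n % 10).digitChar ∈ pvD10 := by
      have h10 : n % 10 < 10 := Nat.mod_lt _ (by norm_num)
      interval_cases h : n % 10 <;> decide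
    rw [Nat.toDigitsCore]
    split
    · intro c hc
      rcases List.mem_cons.mp hc with h | h
      · exact h ▸ hd
      · exact hacc c h
    · exact ih (n / 10) _ (by
        intro c hc
        rcases List.mem_cons.mp hc with h | h
        · exact h ▸ hd
        · exact hacc c h)

lemma pv_len_toDigitsCore : ∀ (f n : Nat) (acc : List Char),
    acc.length ≤ (Nat.toDigitsCore 10 f n acc).length := by
  intro f
  induction f with
  | zero => intro n acc; simp [Nat.toDigitsCore]
  | succ f ih =>
    intro n acc
    rw [Nat.toDigitsCore]
    split
    · simp
    · exact le_trans (by simp) (ih (n / 10) ((n % 10).digitChar :: acc))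

lemma pv_toDigits_mem (m : Nat) : ∀ c ∈ Nat.toDigits 10 m, c ∈ pvD10 :=
  pv_mem_toDigitsCore (m + 1) m [] (by simp)

lemma pv_toDigits_ne_nil (m : Nat) : Nat.toDigits 10 m ≠ [] := by
  intro hnil
  unfold Nat.toDigits at hnil
  rw [Nat.toDigitsCore] at hnil
  split at hnil
  · simp at hnil
  · have := pv_len_toDigitsCore m (m / 10) ((m % 10).digitChar :: [])
    rw [hnil] at this
    simp at this

lemma pv_count_go_singleton (c : Char) : ∀ (f : Nat) (l : List Char) (acc : Nat),
    l.length ≤ f → PySem.Chars.count.go [c] f l acc = acc + l.count c := by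
  intro f
  induction f with
  | zero => intro l acc h
            have : l = [] := List.length_eq_zero_iff.mp (Nat.le_zero.mp h)
            subst this; simp [PySem.Chars.count.go]
  | succ f ih =>
    intro l acc h
    cases l with
    | nil => simp [PySem.Chars.count.go]
    | cons x t =>
      rw [PySem.Chars.count.go]
      by_cases hx : c = x
      · subst hx
        simp only [List.isPrefixOf, BEq.rfl, Bool.and_true, if_pos, List.length_cons,
          List.length_nil, Nat.zero_add, List.drop_succ_cons, List.drop_zero]
        rw [ih t (acc + 1) (by simpa using h)]
        simp
        omega
      · have hpre : [c].isPrefixOf (x :: t) = false := by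
          simp [List.isPrefixOf]
          exact hx
        rw [hpre]
        simp only [if_neg Bool.false_ne_true]
        rw [ih t acc (by simpa using h), List.count_cons_of_ne (show x ≠ c from fun hh => hx hh.symm)]

lemma pv_chars_count_singleton (l : List Char) (c : Char) :
    PySem.Chars.count l [c] = l.count c := by
  simp [PySem.Chars.count]
  simpa using pv_count_go_singleton c l.length l 0 le_rfl

-- on digit characters, A's filter test (int(d) % 2) agrees with B's (d in '13579')
lemma pv_pred_eq (c : Char) (h : c ∈ pvD10) :
    (PySem.Int.mod ((PySem.Int.ofChars? [c]).getD 0) 2 != 0)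
      = PySem.Chars.isIn [c] ['1','3','5','7','9'] := by
  unfold pvD10 at h
  fin_cases h <;> decide

lemma pv_mem_odd (c : Char) (h : c ∈ pvD10)
    (hp : PySem.Chars.isIn [c] ['1','3','5','7','9'] = true) :
    c ∈ (['9','7','5','3','1'] : List Char) := by
  unfold pvD10 at h
  fin_cases h <;> first | decide | (exfalso; exact absurd hp (by decide))

lemma pv_not_minus (c : Char) (h : c ∈ pvD10) : c ≠ '-' := by
  unfold pvD10 at h
  fin_cases h <;> decide

lemma pv_foldA (l : List Char) :
    (PySem.List.pyRange 9 (-1) (-2)).foldl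
      (fun acc num => acc ++ PySem.List.pyRepeat (PySem.Int.toChars num)
        ((PySem.Chars.count l (PySem.Int.toChars num) : Nat) : Int)) []
      = pvCountSorted l := by
  have hr : PySem.List.pyRange 9 (-1) (-2) = [9, 7, 5, 3, 1] := by decide
  have h9 : PySem.Int.toChars 9 = ['9'] := by decide
  have h7 : PySem.Int.toChars 7 = ['7'] := by decide
  have h5 : PySem.Int.toChars 5 = ['5'] := by decide
  have h3 : PySem.Int.toChars 3 = ['3'] := by decide
  have h1 : PySem.Int.toChars 1 = ['1'] := by decide
  rw [hr]
  simp [List.foldl, h9, h7, h5, h3, h1, pv_chars_count_singleton,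
    PySem.List.pyRepeat_singleton, pvCountSorted]

lemma pv_perm (l : List Char) (h : ∀ c ∈ l, c ∈ (['9','7','5','3','1'] : List Char)) :
    (pvCountSorted l).Perm l := by
  rw [List.perm_iff_count]
  intro a
  simp only [pvCountSorted, List.count_append, List.count_replicate]
  by_cases h9 : '9' = a
  · subst h9; simp
  by_cases h7 : '7' = a
  · subst h7; simp
  by_cases h5 : '5' = a
  · subst h5; simp
  by_cases h3 : '3' = a
  · subst h3; simp
  by_cases h1 : '1' = a
  · subst h1; simp
  simp [beq_iff_eq, h9, h7, h5, h3, h1]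
  exact (List.count_eq_zero.mpr (fun hm => by
    have := h a hm; simp_all [eq_comm])).symm

lemma pv_pairwise (l : List Char) : (pvCountSorted l).Pairwise (fun a b => b ≤ a) := by
  unfold pvCountSorted
  simp only [List.pairwise_append, List.pairwise_replicate, List.mem_replicate, List.mem_append]
  refine ⟨⟨⟨⟨Or.inr le_rfl, ⟨Or.inr le_rfl, ?_⟩⟩, ⟨Or.inr le_rfl, ?_⟩⟩, ⟨Or.inr le_rfl, ?_⟩⟩,
    ⟨Or.inr le_rfl, ?_⟩⟩
  · rintro a ⟨-, rfl⟩ b ⟨-, rfl⟩; decide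
  · rintro a (⟨-, rfl⟩ | ⟨-, rfl⟩) b ⟨-, rfl⟩ <;> decide
  · rintro a ((⟨-, rfl⟩ | ⟨-, rfl⟩) | ⟨-, rfl⟩) b ⟨-, rfl⟩ <;> decide
  · rintro a (((⟨-, rfl⟩ | ⟨-, rfl⟩) | ⟨-, rfl⟩) | ⟨-, rfl⟩) b ⟨-, rfl⟩ <;> decide

-- A's counting-sort output IS sorted(l, reverse=True) for a list of odd-digit characters
lemma pv_count_eq_sorted (l : List Char)
    (h : ∀ c ∈ l, c ∈ (['9','7','5','3','1'] : List Char)) :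
    pvCountSorted l = PySem.List.sorted l (fun x => x) true := by
  have hperm : (pvCountSorted l).Perm (PySem.List.sorted l (fun x => x) true) :=
    (pv_perm l h).trans (PySem.List.sorted_perm l (fun x => x) true).symm
  exact hperm.eq_of_pairwise (fun a b _ _ hab hba => le_antisymm hba hab)
    (pv_pairwise l) (PySem.List.sorted_pairwise_rev l (fun x => x))

-- str(n) with the sign stripped is the decimal digit string of |n|
lemma pv_strA (n : Int) :
    (if PySem.List.pyGet? (PySem.Int.toChars n) 0 = some '-'
      then PySem.List.slice (PySem.Int.toChars n) (some 1) none
      else PySem.Int.toChars n) = Nat.toDigits 10 n.natAbs := by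
  by_cases hn : n < 0
  · rw [PySem.Int.toChars, if_pos hn]
    rw [if_pos (by rw [PySem.List.pyGet?_zero_cons])]
    rw [PySem.List.slice_from_one]
    rfl
  · have htn : PySem.Int.toChars n = Nat.toDigits 10 n.natAbs := by
      rw [PySem.Int.toChars, if_neg hn]
      congr 1
      omega
    rw [htn]
    obtain ⟨c, t, hct⟩ := List.exists_cons_of_ne_nil (pv_toDigits_ne_nil n.natAbs)
    rw [hct]
    rw [if_neg (by
      rw [PySem.List.pyGet?_zero_cons]
      intro hc
      exact pv_not_minus c (pv_toDigits_mem n.natAbs c (hct ▸ List.mem_cons_self)) (by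
        injection hc))]

lemma pv_strB (n : Int) : PySem.Int.toChars |n| = Nat.toDigits 10 n.natAbs := by
  rw [PySem.Int.toChars, if_neg (not_lt.mpr (abs_nonneg n))]
  congr 1
  rw [Int.abs_eq_natAbs, Int.toNat_natCast]

-- ===== VERDICT (by name: the statement is the Claim_ definition above) =====
theorem remove_even_and_sort_desc_spec : Claim_equal_remove_even_and_sort_desc := by
  intro n _
  unfold Spec_remove_even_and_sort_desc remove_even_and_sort_desc remove_even_and_sort_desc_alt
  simp only [pv_strA n, pv_strB n]
  have hmem := pv_toDigits_mem n.natAbs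
  have hfilter : (Nat.toDigits 10 n.natAbs).filter
      (fun digit => PySem.Int.mod ((PySem.Int.ofChars? [digit]).getD 0) 2 != 0)
      = (Nat.toDigits 10 n.natAbs).filter (fun d => PySem.Chars.isIn [d] ['1','3','5','7','9']) :=
    List.filter_congr (fun x hx => pv_pred_eq x (hmem x hx))
  rw [hfilter]
  set l := (Nat.toDigits 10 n.natAbs).filter (fun d => PySem.Chars.isIn [d] ['1','3','5','7','9']) with hl
  have hodd : ∀ c ∈ l, c ∈ (['9','7','5','3','1'] : List Char) := by
    intro c hc
    rw [hl, List.mem_filter] at hc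
    exact pv_mem_odd c (hmem c hc.1) hc.2
  rw [pv_foldA l, pv_count_eq_sorted l hodd]
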